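-- pv_equiv track=rewrite | github.com/showe2/crypto-bot | utils/validation.py | sanitize_user_input
-- ===== SOURCE A (Python) =====
-- def sanitize_user_input(input_data: str, max_length: int = 1000) -> str:
--     """Sanitize user input for security"""
--     if not input_data:
--         return ""
--
--     # Convert to string and limit length
--     sanitized = str(input_data)[:max_length]
--
--     # Remove potentially dangerous characters
--     dangerous_chars = ['<', '>', '"', "'", '&', '\x00', '\n', '\r']
--     for char in dangerous_chars:
--         sanitized = sanitized.replace(char, '')
--
--     return sanitized.strip()
-- ===== SOURCE B (Python) =====
-- def sanitize_user_input(input_data: str, max_length: int = 1000) -> str: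
--     """Sanitize user input for security (filter pass + explicit end-trimming)."""
--     if not input_data:
--         return ""
--     kept = [c for c in str(input_data)[:max_length] if c not in '<>"\'&\x00\n\r']
--     while kept and kept[0].isspace():
--         kept = kept[1:]
--     while kept and kept[-1].isspace():
--         kept = kept[:-1]
--     return ''.join(kept)
-- ===== Notes on version B (the rewrite author's own statement) =====
-- stated objective: alternative
-- what changed: Replaces the eight sequential str.replace scans plus str.strip with one filtering pass over the truncated string into a list and two explicit while-loops that drop leading/trailing whitespace, joining at the end.
import Mathlib
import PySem

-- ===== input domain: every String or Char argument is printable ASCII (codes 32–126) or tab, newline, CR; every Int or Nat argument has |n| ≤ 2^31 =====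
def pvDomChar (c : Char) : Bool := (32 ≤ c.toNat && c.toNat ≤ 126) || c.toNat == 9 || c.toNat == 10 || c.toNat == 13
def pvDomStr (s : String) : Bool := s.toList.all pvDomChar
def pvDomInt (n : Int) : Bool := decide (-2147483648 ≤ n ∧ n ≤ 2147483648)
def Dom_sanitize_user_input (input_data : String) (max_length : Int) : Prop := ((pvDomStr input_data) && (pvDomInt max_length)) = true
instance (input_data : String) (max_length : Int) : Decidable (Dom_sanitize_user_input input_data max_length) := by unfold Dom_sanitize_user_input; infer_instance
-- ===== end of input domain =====

-- B replaces A's eight sequential str.replace passes followed by str.strip with a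
-- single filtering pass into a list and two explicit while-loops that drop leading
-- and trailing whitespace; same return value everywhere (objective: alternative).

-- ===== PORT A =====
-- the dangerous_chars list of A (each Python element is a one-char string)
def pvDangerousA : List Char := ['<', '>', '"', '\'', '&', '\x00', '\n', '\r']

def sanitize_user_input (input_data : String) (max_length : Int) : String :=
  if input_data == "" then ""
  else
    let sliced := PySem.List.slice input_data.toList none (some max_length)
    -- for char in dangerous_chars: sanitized = sanitized.replace(char, '')
    let sanitized := pvDangerousA.foldl (fun acc c => PySem.Chars.replace acc [c] []) sliced
    String.ofList (PySem.Chars.strip sanitized)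

-- ===== PORT B =====
-- the literal '<>"\'&\x00\n\r' that B tests membership in ('c not in …' = substring test)
def pvDangerousStr : List Char := ['<', '>', '"', '\'', '&', '\x00', '\n', '\r']

-- while kept and kept[0].isspace(): kept = kept[1:]
def pvTrimFront : List Char → List Char
  | [] => []
  | c :: t => if PySem.Chars.isspace c then pvTrimFront t else c :: t

-- while kept and kept[-1].isspace(): kept = kept[:-1]
def pvTrimBack (l : List Char) : List Char :=
  if h : l = [] then []
  else if PySem.Chars.isspace (l.getLast h) then pvTrimBack l.dropLast else l
termination_by l.length
decreasing_by
  have : l.length ≠ 0 := fun hl => h (List.eq_nil_of_length_eq_zero hl)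
  simp [List.length_dropLast]; omega

def sanitize_user_input_alt (input_data : String) (max_length : Int) : String :=
  if input_data == "" then ""
  else
    -- kept = [c for c in str(input_data)[:max_length] if c not in '<>"\'&\x00\n\r']
    let kept := (PySem.List.slice input_data.toList none (some max_length)).filter
      (fun c => !(PySem.Chars.isIn [c] pvDangerousStr))
    String.ofList (pvTrimBack (pvTrimFront kept))

-- ===== PRECONDITION & SPEC =====
def Spec_sanitize_user_input (input_data : String) (max_length : Int) (out : String) : Prop := out = sanitize_user_input_alt input_data max_length
instance (input_data : String) (max_length : Int) (out : String) : Decidable (Spec_sanitize_user_input input_data max_length out) := by unfold Spec_sanitize_user_input; infer_instance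

-- ===== CLAIM (what is proved, stated in full; the proofs are below) =====
def Claim_equal_sanitize_user_input : Prop := ∀ (input_data : String) (max_length : Int), Dom_sanitize_user_input input_data max_length → Spec_sanitize_user_input input_data max_length (sanitize_user_input input_data max_length)

-- ===== LEMMAS AND PROOFS =====

-- replace.go with a single-char pattern and empty replacement is a filter
lemma go_single (d : Char) :
    ∀ (l : List Char) (fuel : Nat) (acc : List Char), l.length ≤ fuel →
      PySem.Chars.replace.go [d] [] fuel l acc
        = acc.reverse ++ l.filter (fun c => !(c == d)) := by
  intro l
  induction l with
  | nil =>
    intro fuel acc _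
    cases fuel <;> simp [PySem.Chars.replace.go]
  | cons c t ih =>
    intro fuel acc hlen
    cases fuel with
    | zero => simp at hlen
    | succ n =>
      rw [PySem.Chars.replace.go]
      simp only [List.isPrefixOf, Bool.and_true]
      by_cases h : d = c
      · subst h
        simp only [beq_self_eq_true, if_true]
        have hdrop : List.drop [d].length (d :: t) = t := rfl
        have hacc : ([] : List Char).reverse ++ acc = acc := rfl
        rw [hdrop, hacc, ih _ _ (by simpa using Nat.le_of_succ_le_succ hlen)]
        simp
      · have hbeq : (d == c) = false := by simp [h]
        have hbeq' : (c == d) = false := by simp [Ne.symm h]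
        simp only [hbeq]
        rw [ih _ _ (by simpa using Nat.le_of_succ_le_succ hlen)]
        simp [hbeq']

lemma replace_single (cs : List Char) (d : Char) :
    PySem.Chars.replace cs [d] [] = cs.filter (fun c => !(c == d)) := by
  rw [PySem.Chars.replace]
  simp only [List.isEmpty_cons, if_false, Bool.false_eq_true]
  simpa using go_single d cs cs.length [] le_rfl

-- the sequential replace loop over a list of chars is one filter by list membership
lemma foldl_replace_eq_filter :
    ∀ (ds cs : List Char),
      ds.foldl (fun acc c => PySem.Chars.replace acc [c] []) cs
        = cs.filter (fun c => !(ds.contains c)) := by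
  intro ds
  induction ds with
  | nil => intro cs; simp
  | cons d ds ih =>
    intro cs
    rw [List.foldl_cons, ih, replace_single, List.filter_filter]
    apply List.filter_congr
    intro c _
    by_cases hc : c = d
    · simp [hc]
    · simp [hc, Bool.and_comm]

-- the one-char substring test of B is list membership
lemma isIn_single (c : Char) (ds : List Char) :
    PySem.Chars.isIn [c] ds = ds.contains c := by
  by_cases h : c ∈ ds
  · have : PySem.Chars.isIn [c] ds = true := by
      rw [PySem.Chars.isIn_iff_infix]
      obtain ⟨s, t, rfl⟩ := List.append_of_mem h
      exact ⟨s, t, by simp⟩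
    simp [this, h]
  · have : PySem.Chars.isIn [c] ds = false := by
      rw [PySem.Chars.isIn_eq_false_iff]
      intro hin
      exact h (hin.subset (by simp))
    simp [this, h]

-- B's first while loop is dropWhile
lemma trimFront_eq (l : List Char) :
    pvTrimFront l = l.dropWhile PySem.Chars.isspace := by
  induction l with
  | nil => rfl
  | cons c t ih =>
    by_cases h : PySem.Chars.isspace c
    · simp [pvTrimFront, h, ih]
    · simp [pvTrimFront, h]

-- B's second while loop is dropWhile on the reverse
lemma trimBack_eq (l : List Char) :
    pvTrimBack l = (l.reverse.dropWhile PySem.Chars.isspace).reverse := by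
  induction l using List.reverseRecOn with
  | nil => simp [pvTrimBack]
  | append_singleton xs x ih =>
    rw [pvTrimBack]
    have hne : xs ++ [x] ≠ [] := by simp
    simp only [hne, dif_neg, not_false_iff]
    have hlast : (xs ++ [x]).getLast hne = x := by simp
    have hdrop : (xs ++ [x]).dropLast = xs := List.dropLast_concat ..
    rw [hlast, hdrop]
    by_cases h : PySem.Chars.isspace x
    · simp [h, ih]
    · simp [h]

-- ===== VERDICT (by name: the statement is the Claim_ definition above) =====
theorem sanitize_user_input_spec : Claim_equal_sanitize_user_input := by
  intro input_data max_length _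
  unfold Spec_sanitize_user_input sanitize_user_input sanitize_user_input_alt
  by_cases h : input_data == ""
  · simp [h]
  · simp only [h, Bool.false_eq_true, if_false]
    rw [foldl_replace_eq_filter, trimFront_eq, trimBack_eq]
    have hpred : ∀ c, (!(PySem.Chars.isIn [c] pvDangerousStr)) = (!(pvDangerousA.contains c)) := by
      intro c; rw [isIn_single]; rfl
    simp only [hpred]
    rfl
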